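-- pv_equiv track=rewrite | github.com/fraluc06/PythonExercises | Esami/2025-2026/SYM3-ALMZ/program.py | disegna_rettangolo
-- ===== SOURCE A (Python) =====
-- def disegna_rettangolo(img, x, y, larghezza, altezza, colore, L, A):
--     N = 0
--     for dx in range(larghezza):
--         for dy in range(altezza):
--             X = x + dx
--             Y = y + dy
--             if  0 <= X < L and 0 <= Y < A:
--                 img[Y][X] = colore
--                 N += 1
--     return N
-- ===== SOURCE B (Python) =====
-- def disegna_rettangolo(img, x, y, larghezza, altezza, colore, L, A):
--     x_lo = max(0, x)
--     x_hi = min(L, x + larghezza)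
--     y_lo = max(0, y)
--     y_hi = min(A, y + altezza)
--     if x_lo < x_hi:
--         for Y in range(y_lo, y_hi):
--             row = img[Y]
--             for X in range(x_lo, x_hi):
--                 row[X] = colore
--     return max(0, x_hi - x_lo) * max(0, y_hi - y_lo)
-- ===== Notes on version B (the rewrite author's own statement) =====
-- stated objective: faster
-- what changed: B clips the rectangle to [0,L)x[0,A) up front and returns the pixel count as the closed-form product max(0,x_hi-x_lo)*max(0,y_hi-y_lo), filling only the clipped region with no per-pixel bounds check, instead of A's per-pixel test-and-increment over the whole larghezza*altezza grid.
import Mathlib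
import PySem

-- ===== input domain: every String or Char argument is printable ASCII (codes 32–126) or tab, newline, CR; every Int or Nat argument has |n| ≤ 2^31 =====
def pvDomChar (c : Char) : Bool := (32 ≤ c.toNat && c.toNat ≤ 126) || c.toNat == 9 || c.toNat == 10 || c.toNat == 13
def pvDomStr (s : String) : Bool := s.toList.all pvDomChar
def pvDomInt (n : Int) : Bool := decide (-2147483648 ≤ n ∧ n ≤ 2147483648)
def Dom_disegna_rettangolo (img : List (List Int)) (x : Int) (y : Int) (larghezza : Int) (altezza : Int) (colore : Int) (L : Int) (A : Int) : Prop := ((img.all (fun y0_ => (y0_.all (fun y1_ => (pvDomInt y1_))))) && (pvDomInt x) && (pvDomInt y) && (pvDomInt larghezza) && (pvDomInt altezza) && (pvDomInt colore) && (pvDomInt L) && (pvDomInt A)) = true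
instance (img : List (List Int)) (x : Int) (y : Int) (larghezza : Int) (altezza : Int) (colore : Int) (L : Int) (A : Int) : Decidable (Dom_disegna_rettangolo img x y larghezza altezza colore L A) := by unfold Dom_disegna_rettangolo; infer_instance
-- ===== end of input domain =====

-- B clips the rectangle first and returns the count as the closed-form product of the clipped
-- side lengths instead of A's per-pixel test-and-increment; both Pythons also fill img in place
-- (the same cells with the same colore), a side effect the ports omit: the equivalence proved
-- here is about the RETURN value only.

-- ===== PORT A =====
-- Literal port of A's nested per-pixel loop; the in-place write img[Y][X] = colore does not
-- affect the returned count N and is omitted (mutation is outside the return-value equivalence).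
def disegna_rettangolo (img : List (List Int)) (x : Int) (y : Int) (larghezza : Int) (altezza : Int) (colore : Int) (L : Int) (A : Int) : Int :=
  (PySem.List.pyRange 0 larghezza 1).foldl (fun N dx =>
    (PySem.List.pyRange 0 altezza 1).foldl (fun N dy =>
      if (0 ≤ x + dx ∧ x + dx < L) ∧ (0 ≤ y + dy ∧ y + dy < A) then N + 1 else N) N) 0

-- ===== PORT B =====
-- Literal port of Source B's returned value; Source B's fill loop over the clipped region writes colore
-- in place and does not affect the return value, so it is omitted here.
def disegna_rettangolo_alt (img : List (List Int)) (x : Int) (y : Int) (larghezza : Int) (altezza : Int) (colore : Int) (L : Int) (A : Int) : Int :=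
  let x_lo := max 0 x
  let x_hi := min L (x + larghezza)
  let y_lo := max 0 y
  let y_hi := min A (y + altezza)
  max 0 (x_hi - x_lo) * max 0 (y_hi - y_lo)

-- ===== PRECONDITION & SPEC =====
-- Pre_ excludes exactly the inputs where the Python A raises IndexError: when the clipped
-- rectangle is nonempty, img must have at least y_hi rows and every touched row at least x_hi
-- cells (B raises on the same inputs).
def Pre_disegna_rettangolo (img : List (List Int)) (x : Int) (y : Int) (larghezza : Int) (altezza : Int) (colore : Int) (L : Int) (A : Int) : Prop :=
  (max 0 x < min L (x + larghezza) ∧ max 0 y < min A (y + altezza)) →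
    (min A (y + altezza) ≤ (img.length : Int) ∧
     ∀ r ∈ (img.drop (max 0 y).toNat).take (min A (y + altezza) - max 0 y).toNat,
       min L (x + larghezza) ≤ (r.length : Int))
instance (img : List (List Int)) (x : Int) (y : Int) (larghezza : Int) (altezza : Int) (colore : Int) (L : Int) (A : Int) : Decidable (Pre_disegna_rettangolo img x y larghezza altezza colore L A) := by unfold Pre_disegna_rettangolo; infer_instance

def pvWitness_disegna_rettangolo : List (List Int) × Int × Int × Int × Int × Int × Int × Int :=
  ([[0, 0], [0, 0]], 0, 0, 2, 2, 5, 2, 2)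

def Spec_disegna_rettangolo (img : List (List Int)) (x : Int) (y : Int) (larghezza : Int) (altezza : Int) (colore : Int) (L : Int) (A : Int) (out : Int) : Prop := out = disegna_rettangolo_alt img x y larghezza altezza colore L A
instance (img : List (List Int)) (x : Int) (y : Int) (larghezza : Int) (altezza : Int) (colore : Int) (L : Int) (A : Int) (out : Int) : Decidable (Spec_disegna_rettangolo img x y larghezza altezza colore L A out) := by unfold Spec_disegna_rettangolo; infer_instance

-- ===== CLAIM (what is proved, stated in full; the proofs are below) =====
def Claim_equal_disegna_rettangolo : Prop := ∀ (img : List (List Int)) (x : Int) (y : Int) (larghezza : Int) (altezza : Int) (colore : Int) (L : Int) (A : Int), Dom_disegna_rettangolo img x y larghezza altezza colore L A → Pre_disegna_rettangolo img x y larghezza altezza colore L A → Spec_disegna_rettangolo img x y larghezza altezza colore L A (disegna_rettangolo img x y larghezza altezza colore L A)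

-- ===== LEMMAS AND PROOFS =====

-- Counting fold over range(0,m): adds max 0 (min hi (s+m) - max lo s) to the accumulator.
theorem pv_fold_count_nat (lo hi s : Int) (m : ℕ) : ∀ (N : Int),
    (PySem.List.pyRange 0 (m : Int) 1).foldl
      (fun N t => if lo ≤ s + t ∧ s + t < hi then N + 1 else N) N
    = N + max 0 (min hi (s + m) - max lo s) := by
  induction m with
  | zero =>
    intro N
    rw [PySem.List.pyRange_one_eq_nil (by norm_num)]
    simp only [List.foldl_nil]
    omega
  | succ k ih =>
    intro N
    rw [show ((k + 1 : ℕ) : Int) = (k : Int) + 1 by push_cast; ring,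
        PySem.List.pyRange_one_succ_right (by positivity), List.foldl_append, ih]
    simp only [List.foldl_cons, List.foldl_nil]
    split_ifs with h <;> omega

theorem pv_fold_count (lo hi s n : Int) (N : Int) :
    (PySem.List.pyRange 0 n 1).foldl
      (fun N t => if lo ≤ s + t ∧ s + t < hi then N + 1 else N) N
    = N + max 0 (min hi (s + n) - max lo s) := by
  rcases le_or_gt n 0 with h | h
  · rw [PySem.List.pyRange_one_eq_nil (by omega)]
    simp; omega
  · have : n = ((n.toNat : ℕ) : Int) := by omega
    rw [this, pv_fold_count_nat]

-- Summing fold over range(0,m): adds K per element satisfying the interval condition.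
theorem pv_fold_sum_nat (lo hi s K : Int) (m : ℕ) : ∀ (N : Int),
    (PySem.List.pyRange 0 (m : Int) 1).foldl
      (fun N t => N + (if lo ≤ s + t ∧ s + t < hi then K else 0)) N
    = N + K * max 0 (min hi (s + m) - max lo s) := by
  induction m with
  | zero =>
    intro N
    rw [PySem.List.pyRange_one_eq_nil (by norm_num)]
    simp only [List.foldl_nil]
    have : max 0 (min hi (s + ((0 : ℕ) : Int)) - max lo s) = 0 := by push_cast; omega
    rw [this, mul_zero, add_zero]
  | succ k ih =>
    intro N
    rw [show ((k + 1 : ℕ) : Int) = (k : Int) + 1 by push_cast; ring,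
        PySem.List.pyRange_one_succ_right (by positivity), List.foldl_append, ih]
    simp only [List.foldl_cons, List.foldl_nil]
    have hstep : max 0 (min hi (s + ((k : Int) + 1)) - max lo s)
        = max 0 (min hi (s + (k : Int)) - max lo s)
          + (if lo ≤ s + (k : Int) ∧ s + (k : Int) < hi then 1 else 0) := by
      split_ifs with h <;> omega
    rw [hstep]
    split_ifs with h <;> ring

theorem pv_fold_sum (lo hi s K n : Int) (N : Int) :
    (PySem.List.pyRange 0 n 1).foldl
      (fun N t => N + (if lo ≤ s + t ∧ s + t < hi then K else 0)) N
    = N + K * max 0 (min hi (s + n) - max lo s) := by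
  rcases le_or_gt n 0 with h | h
  · rw [PySem.List.pyRange_one_eq_nil (by omega)]
    have : max 0 (min hi (s + n) - max lo s) = 0 := by omega
    simp [this]
  · have : n = ((n.toNat : ℕ) : Int) := by omega
    rw [this, pv_fold_sum_nat]

-- The inner loop of A collapses: it adds the clipped y-count when dx is an in-bounds column.
theorem pv_inner_eq (x y L A altezza dx : Int) (N : Int) :
    (PySem.List.pyRange 0 altezza 1).foldl
      (fun N dy => if (0 ≤ x + dx ∧ x + dx < L) ∧ (0 ≤ y + dy ∧ y + dy < A) then N + 1 else N) N
    = N + (if 0 ≤ x + dx ∧ x + dx < L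
           then max 0 (min A (y + altezza) - max 0 y) else 0) := by
  by_cases hq : 0 ≤ x + dx ∧ x + dx < L
  · simp only [hq, true_and]
    exact pv_fold_count 0 A y altezza N
  · simp only [hq, false_and, if_false]
    simp

-- ===== VERDICT (by name: the statement is the Claim_ definition above) =====
theorem disegna_rettangolo_spec : Claim_equal_disegna_rettangolo := by
  intro img x y larghezza altezza colore L A _ _
  unfold Spec_disegna_rettangolo disegna_rettangolo disegna_rettangolo_alt
  have hbody :
      (fun (N dx : Int) =>
        (PySem.List.pyRange 0 altezza 1).foldl
          (fun N dy => if (0 ≤ x + dx ∧ x + dx < L) ∧ (0 ≤ y + dy ∧ y + dy < A) then N + 1 else N) N)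
      = fun (N dx : Int) =>
        N + (if 0 ≤ x + dx ∧ x + dx < L
             then max 0 (min A (y + altezza) - max 0 y) else 0) := by
    funext N dx
    exact pv_inner_eq x y L A altezza dx N
  rw [hbody, pv_fold_sum 0 L x (max 0 (min A (y + altezza) - max 0 y)) larghezza 0]
  ring
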